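-- pv_equiv track=rewrite | github.com/ailabstw/opinion-analysis | scripts/cluster/graph_cluster.py | find_clique_cover
-- ===== SOURCE A (Python) =====
-- def find_clique_cover(cliques):
--     cliques = sorted(cliques, key=lambda v: len(v), reverse=True)
--
--     duplicated = set()
--     cliques_cover = []
--
--     for clique in cliques:
--         sub_component = []
--         for node in clique:
--             if node not in duplicated:
--                 duplicated.add(node)
--                 sub_component.append(node)
--         if sub_component:
--             cliques_cover.append(sub_component)
--     return cliques_cover
-- ===== SOURCE B (Python) =====
-- def find_clique_cover(cliques):
--     ordered = sorted(cliques, key=len, reverse=True)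
--
--     # Pass 1: each node's winner = index of the first (largest) clique containing it.
--     winner = {}
--     for i, clique in enumerate(ordered):
--         for node in clique:
--             if node not in winner:
--                 winner[node] = i
--
--     # Pass 2: group each clique's nodes that it won, in order, first occurrence only.
--     cover = []
--     for i, clique in enumerate(ordered):
--         sub = []
--         seen = set()
--         for node in clique:
--             if winner[node] == i and node not in seen:
--                 seen.add(node)
--                 sub.append(node)
--         if sub:
--             cover.append(sub)
--     return cover
-- ===== Notes on version B (the rewrite author's own statement) =====
-- stated objective: alternative
-- what changed: Replaces the single interleaved loop (mutating one global 'duplicated' set while appending) by two separate passes: first build a winner index mapping each node to its first size-sorted clique, then group each clique's own winning nodes; the global dedup set disappears from the grouping pass.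
import Mathlib
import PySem

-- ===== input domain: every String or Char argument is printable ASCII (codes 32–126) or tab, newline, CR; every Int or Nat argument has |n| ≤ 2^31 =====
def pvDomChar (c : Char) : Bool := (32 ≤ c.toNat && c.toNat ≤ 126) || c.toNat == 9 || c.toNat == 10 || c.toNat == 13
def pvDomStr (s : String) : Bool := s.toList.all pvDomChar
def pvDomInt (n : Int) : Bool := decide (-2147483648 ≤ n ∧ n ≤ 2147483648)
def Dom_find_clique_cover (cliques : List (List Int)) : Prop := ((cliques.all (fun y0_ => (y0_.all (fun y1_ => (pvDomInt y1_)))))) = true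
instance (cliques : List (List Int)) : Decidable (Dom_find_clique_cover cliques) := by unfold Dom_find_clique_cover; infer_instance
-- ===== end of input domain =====

-- B replaces A's single interleaved loop (global dedup set mutated while appending) by two
-- passes: build a node→first-clique winner index, then group each clique's winning nodes
-- (objective: alternative decomposition, same cost).

-- ===== PORT A =====
-- inner loop 'for node in clique: …' of A, state (duplicated, sub_component)
def pvInnerA (dup : PySem.Set Int) (sub : List Int) (clique : List Int) :
    PySem.Set Int × List Int :=
  clique.foldl (fun st node =>
    if st.1.contains node then st else (PySem.Set.add st.1 node, st.2 ++ [node])) (dup, sub)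

-- outer loop 'for clique in cliques: …' of A, state (duplicated, cliques_cover)
def pvOuterA (dup : PySem.Set Int) (cover : List (List Int)) (cliques : List (List Int)) :
    PySem.Set Int × List (List Int) :=
  cliques.foldl (fun st clique =>
    let r := pvInnerA st.1 [] clique
    if r.2 ≠ [] then (r.1, st.2 ++ [r.2]) else (r.1, st.2)) (dup, cover)

def find_clique_cover (cliques : List (List Int)) : List (List Int) :=
  (pvOuterA PySem.Set.empty [] (PySem.List.sorted cliques (fun v => v.length) true)).2

-- ===== PORT B =====
-- pass 1 of B: 'for i, clique in enumerate(ordered): for node in clique: if node not in winner: winner[node] = i'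
def pvWinnerB (w : PySem.Dict Int Int) (pairs : List (Int × List Int)) : PySem.Dict Int Int :=
  pairs.foldl (fun w p =>
    p.2.foldl (fun w node => if w.contains node then w else w.insert node p.1) w) w

-- inner loop of pass 2 of B, state (sub, seen)
def pvSubB (w : PySem.Dict Int Int) (i : Int) (sub : List Int) (seen : PySem.Set Int)
    (clique : List Int) : List Int × PySem.Set Int :=
  clique.foldl (fun st node =>
    if (w.get? node == some i) && !(st.2.contains node)
    then (st.1 ++ [node], PySem.Set.add st.2 node) else st) (sub, seen)

-- outer loop of pass 2 of B
def pvOuterB (w : PySem.Dict Int Int) (cover : List (List Int))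
    (pairs : List (Int × List Int)) : List (List Int) :=
  pairs.foldl (fun cover p =>
    let sub := (pvSubB w p.1 [] PySem.Set.empty p.2).1
    if sub ≠ [] then cover ++ [sub] else cover) cover

def find_clique_cover_alt (cliques : List (List Int)) : List (List Int) :=
  let ordered := PySem.List.sorted cliques (fun v => v.length) true
  let winner := pvWinnerB PySem.Dict.empty (PySem.List.enumerate ordered)
  pvOuterB winner [] (PySem.List.enumerate ordered)

-- ===== PRECONDITION & SPEC =====
def Spec_find_clique_cover (cliques : List (List Int)) (out : List (List Int)) : Prop := out = find_clique_cover_alt cliques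
instance (cliques : List (List Int)) (out : List (List Int)) : Decidable (Spec_find_clique_cover cliques out) := by unfold Spec_find_clique_cover; infer_instance

-- ===== CLAIM (what is proved, stated in full; the proofs are below) =====
def Claim_equal_find_clique_cover : Prop := ∀ (cliques : List (List Int)), Dom_find_clique_cover cliques → Spec_find_clique_cover cliques (find_clique_cover cliques)

-- ===== LEMMAS AND PROOFS =====

-- first index ≥ i (in the sorted list) of a clique containing n
def pvFirstIdx (n : Int) (i : Int) : List (List Int) → Option Int
  | [] => none
  | c :: t => if n ∈ c then some i else pvFirstIdx n (i + 1) t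

-- a key absent from a dict has no value
lemma pvGetNone (w : PySem.Dict Int Int) (n : Int) (h : w.contains n = false) :
    w.get? n = none := by
  have hc := PySem.Dict.contains_eq_isSome_get? (d := w) (k := n)
  rw [h] at hc
  cases hg : w.get? n
  · rfl
  · rw [hg] at hc; simp at hc

-- pass-1 inner fold: first-wins insert over one clique
lemma pvWinnerB_inner (c : List Int) (w : PySem.Dict Int Int) (i n : Int) :
    (c.foldl (fun w node => if w.contains node then w else w.insert node i) w).get? n
      = if w.contains n then w.get? n else if n ∈ c then some i else none := by
  induction c generalizing w with
  | nil =>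
    simp only [List.foldl_nil, List.not_mem_nil, if_false]
    by_cases hn : w.contains n
    · rw [if_pos hn]
    · rw [if_neg hn, pvGetNone w n (by simpa using hn)]
  | cons m rest ih =>
    simp only [List.foldl_cons]
    by_cases hm : w.contains m
    · rw [if_pos hm, ih]
      by_cases hn : w.contains n
      · rw [if_pos hn, if_pos hn]
      · rw [if_neg hn, if_neg hn]
        by_cases hmn : n = m
        · subst hmn; exact absurd hm hn
        · simp [List.mem_cons, hmn]
    · rw [if_neg hm, ih]
      by_cases hmn : n = m
      · subst hmn
        have hc : (w.insert n i).contains n = true := by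
          rw [PySem.Dict.contains_eq_isSome_get?, PySem.Dict.get?_insert_self]; rfl
        rw [if_pos hc, PySem.Dict.get?_insert_self,
          if_neg (by simpa using hm)]
        simp
      · have hg : (w.insert m i).get? n = w.get? n := PySem.Dict.get?_insert_of_ne w i hmn
        have hc : (w.insert m i).contains n = w.contains n := by
          rw [PySem.Dict.contains_eq_isSome_get?, hg, PySem.Dict.contains_eq_isSome_get?]
        rw [hc, hg]
        by_cases hn : w.contains n
        · rw [if_pos hn, if_pos hn]
        · rw [if_neg hn, if_neg hn]
          simp [List.mem_cons, hmn]

lemma pvWinnerB_get? (t : List (List Int)) (i : Int) (w : PySem.Dict Int Int) (n : Int) :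
    (pvWinnerB w (PySem.List.enumerate t i)).get? n
      = if w.contains n then w.get? n else pvFirstIdx n i t := by
  induction t generalizing i w with
  | nil =>
    simp only [PySem.List.enumerate_nil, pvWinnerB, List.foldl_nil, pvFirstIdx]
    by_cases hn : w.contains n
    · rw [if_pos hn]
    · rw [if_neg hn, pvGetNone w n (by simpa using hn)]
  | cons c rest ih =>
    rw [PySem.List.enumerate_cons]
    simp only [pvWinnerB, List.foldl_cons] at *
    have hw1 := pvWinnerB_inner c w i n
    by_cases hn : w.contains n
    · have h1 : (c.foldl (fun w node => if w.contains node then w else w.insert node i) w).get? n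
          = w.get? n := by rw [hw1, if_pos hn]
      have h2 : (c.foldl (fun w node => if w.contains node then w else w.insert node i) w).contains n
          = true := by
        rw [PySem.Dict.contains_eq_isSome_get?, h1, ← PySem.Dict.contains_eq_isSome_get?]
        exact hn
      rw [ih, h2, if_pos rfl, h1, if_pos hn]
    · by_cases hcn : n ∈ c
      · have h1 : (c.foldl (fun w node => if w.contains node then w else w.insert node i) w).get? n
            = some i := by rw [hw1, if_neg hn, if_pos hcn]
        have h2 : (c.foldl (fun w node => if w.contains node then w else w.insert node i) w).contains n
            = true := by rw [PySem.Dict.contains_eq_isSome_get?, h1]; rfl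
        rw [ih, h2, if_pos rfl, h1, if_neg hn]
        simp [pvFirstIdx, hcn]
      · have h1 : (c.foldl (fun w node => if w.contains node then w else w.insert node i) w).get? n
            = none := by rw [hw1, if_neg hn, if_neg hcn]
        have h2 : (c.foldl (fun w node => if w.contains node then w else w.insert node i) w).contains n
            = false := by rw [PySem.Dict.contains_eq_isSome_get?, h1]; rfl
        rw [ih, h2, if_neg (by simp), if_neg hn]
        simp [pvFirstIdx, hcn]

lemma pvFirstIdx_char (t : List (List Int)) (i : Int) (k : Nat) (n : Int)
    (hk : k < t.length) (hmem : n ∈ t.getD k []) :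
    (pvFirstIdx n i t = some (i + k) ↔ ∀ j < k, n ∉ t.getD j []) := by
  induction t generalizing i k with
  | nil => simp at hk
  | cons c rest ih =>
    cases k with
    | zero =>
      simp only [List.getD_cons_zero] at hmem
      simp [pvFirstIdx, hmem]
    | succ k =>
      simp only [List.getD_cons_succ] at hmem
      simp only [pvFirstIdx]
      by_cases hc : n ∈ c
      · simp only [hc, if_true]
        constructor
        · intro h
          exfalso
          have : i = i + (k + 1 : Nat) := Option.some.inj h
          omega
        · intro h
          exfalso
          exact h 0 (by omega) (by simpa using hc)
      · simp only [hc, if_false]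
        have hk' : k < rest.length := by simpa using hk
        have hcast : (i + ((k + 1 : Nat) : Int)) = (i + 1) + (k : Int) := by push_cast; ring
        rw [hcast, ih (i + 1) k hk' hmem]
        constructor
        · intro h j hj
          cases j with
          | zero => simpa using hc
          | succ j => simpa using h j (by omega)
        · intro h j hj
          simpa using h (j + 1) (by omega)

-- the dup component of A's inner loop is Set.update
lemma pvInnerA_fst (c : List Int) (dup : PySem.Set Int) (sub : List Int) :
    (pvInnerA dup sub c).1 = PySem.Set.update dup c := by
  induction c generalizing dup sub with
  | nil => simp [pvInnerA, PySem.Set.update]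
  | cons m rest ih =>
    simp only [pvInnerA, List.foldl_cons] at *
    rw [PySem.Set.update_cons]
    by_cases hm : dup.contains m
    · have he : PySem.Set.add dup m = dup :=
        PySem.Set.add_of_mem ((PySem.Set.contains_iff _ _).mp hm)
      rw [if_pos hm, ih, he]
    · rw [if_neg hm, ih]

-- membership transfer for Set.add
lemma pvAddContains (s : PySem.Set Int) (m n : Int) (hnm : n ≠ m) :
    (PySem.Set.add s m).contains n = s.contains n := by
  cases hs : s.contains n
  · cases ha : (PySem.Set.add s m).contains n
    · rfl
    · rcases (PySem.Set.mem_add _ _ _).mp ((PySem.Set.contains_iff _ _).mp ha) with h | h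
      · rw [(PySem.Set.contains_iff _ _).mpr h] at hs; exact absurd hs (by simp)
      · exact absurd h hnm
  · exact (PySem.Set.contains_iff _ _).mpr
      ((PySem.Set.mem_add _ _ _).mpr (Or.inl ((PySem.Set.contains_iff _ _).mp hs)))

-- inner loops of A and B produce the same sub_component
lemma pvInner_eq (w : PySem.Dict Int Int) (i : Int) (dup0 : PySem.Set Int)
    (c : List Int) (dup seen : PySem.Set Int) (sub : List Int)
    (H1 : ∀ n ∈ c, (w.get? n = some i ↔ dup0.contains n = false))
    (H2 : ∀ n : Int, dup.contains n = (dup0.contains n || seen.contains n)) :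
    (pvInnerA dup sub c).2 = (pvSubB w i sub seen c).1 := by
  induction c generalizing dup seen sub with
  | nil => simp [pvInnerA, pvSubB]
  | cons m rest ih =>
    simp only [pvInnerA, pvSubB, List.foldl_cons] at *
    have h1m := H1 m (by simp)
    have hcond : (dup.contains m = false)
        ↔ ((w.get? m == some i) && !(seen.contains m)) = true := by
      rw [H2 m]
      constructor
      · intro h
        have hd : dup0.contains m = false := by
          cases hdd : dup0.contains m
          · rfl
          · rw [hdd] at h; simp at h
        have hs : seen.contains m = false := by
          cases hss : seen.contains m
          · rfl
          · rw [hss] at h; simp at h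
        have hns : m ∉ seen := fun hmem => by
          rw [(PySem.Set.contains_iff _ _).mpr hmem] at hs
          exact absurd hs (by simp)
        simp [h1m.mpr hd, hns]
      · intro h
        simp only [Bool.and_eq_true, beq_iff_eq, Bool.not_eq_true'] at h
        rw [h1m.mp h.1, h.2]
        simp
    by_cases hm : dup.contains m = true
    · have hb : ¬ ((w.get? m == some i) && !(seen.contains m)) = true := by
        intro hbb
        rw [hcond.mpr hbb] at hm
        exact absurd hm (by simp)
      rw [if_pos hm, if_neg hb]
      exact ih dup seen sub (fun n hn => H1 n (List.mem_cons_of_mem _ hn)) H2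
    · have hm' : dup.contains m = false := by
        cases hdd : dup.contains m
        · rfl
        · exact absurd hdd hm
      rw [if_neg hm, if_pos (hcond.mp hm')]
      refine ih _ _ _ (fun n hn => H1 n (List.mem_cons_of_mem _ hn)) ?_
      intro n
      by_cases hnm : n = m
      · subst hnm
        have hd : n ∈ PySem.Set.add dup n := (PySem.Set.mem_add _ _ _).mpr (Or.inr rfl)
        have hs : n ∈ PySem.Set.add seen n := (PySem.Set.mem_add _ _ _).mpr (Or.inr rfl)
        rw [(PySem.Set.contains_iff _ _).mpr hd, (PySem.Set.contains_iff _ _).mpr hs]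
        simp
      · rw [pvAddContains dup m n hnm, pvAddContains seen m n hnm, H2 n]

-- the outer loops agree under the winner/dup invariant
lemma pvOuter_eq (w : PySem.Dict Int Int) (t : List (List Int)) (i : Int)
    (dup : PySem.Set Int) (acc : List (List Int))
    (INV : ∀ (k : Nat) (n : Int), k < t.length → n ∈ t.getD k [] →
      (w.get? n = some (i + k) ↔ (dup.contains n = false ∧ ∀ j < k, n ∉ t.getD j []))) :
    (pvOuterA dup acc t).2 = pvOuterB w acc (PySem.List.enumerate t i) := by
  induction t generalizing i dup acc with
  | nil => simp [pvOuterA, pvOuterB]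
  | cons c rest ih =>
    rw [PySem.List.enumerate_cons]
    simp only [pvOuterA, pvOuterB, List.foldl_cons] at *
    have hsub : (pvInnerA dup [] c).2 = (pvSubB w i [] PySem.Set.empty c).1 := by
      apply pvInner_eq w i dup
      · intro n hn
        have := INV 0 n (by simp) (by simpa using hn)
        simpa using this
      · intro n
        have he : (PySem.Set.empty : PySem.Set Int).contains n = false := rfl
        rw [he, Bool.or_false]
    have hdup : (pvInnerA dup [] c).1 = PySem.Set.update dup c := pvInnerA_fst c dup []
    have INV' : ∀ (k : Nat) (n : Int), k < rest.length → n ∈ rest.getD k [] →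
        (w.get? n = some ((i + 1) + k) ↔
          ((PySem.Set.update dup c).contains n = false ∧ ∀ j < k, n ∉ rest.getD j [])) := by
      intro k n hk hmem
      have hI := INV (k + 1) n (by simpa using Nat.succ_lt_succ hk) (by simpa using hmem)
      have hupd : (PySem.Set.update dup c).contains n = false
          ↔ (dup.contains n = false ∧ n ∉ c) := by
        constructor
        · intro h
          refine ⟨?_, ?_⟩
          · cases hd : dup.contains n
            · rfl
            · rw [(PySem.Set.contains_iff _ _).mpr
                ((PySem.Set.mem_update _ _ _).mpr (Or.inl ((PySem.Set.contains_iff _ _).mp hd)))] at h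
              exact absurd h (by simp)
          · intro hc
            rw [(PySem.Set.contains_iff _ _).mpr ((PySem.Set.mem_update _ _ _).mpr (Or.inr hc))] at h
            exact absurd h (by simp)
        · rintro ⟨h1, h2⟩
          cases hu : (PySem.Set.update dup c).contains n
          · rfl
          · rcases (PySem.Set.mem_update _ _ _).mp ((PySem.Set.contains_iff _ _).mp hu) with h | h
            · rw [(PySem.Set.contains_iff _ _).mpr h] at h1
              exact absurd h1 (by simp)
            · exact absurd h h2
      have harith : (i + 1 + (k : Int)) = i + ((k + 1 : Nat) : Int) := by push_cast; ring
      rw [harith, hI, hupd]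
      constructor
      · rintro ⟨h1, h2⟩
        exact ⟨⟨h1, by simpa using h2 0 (by omega)⟩,
          fun j hj => by simpa using h2 (j + 1) (by omega)⟩
      · rintro ⟨⟨h1, hc⟩, h2⟩
        refine ⟨h1, fun j hj => ?_⟩
        cases j with
        | zero => simpa using hc
        | succ j => simpa using h2 j (by omega)
    by_cases hne : (pvSubB w i [] PySem.Set.empty c).1 = []
    · rw [if_neg (by rw [hsub]; simpa using hne), if_neg (by simpa using hne), hdup]
      exact ih (i + 1) (PySem.Set.update dup c) acc INV'
    · rw [if_pos (by rw [hsub]; simpa using hne), if_pos (by simpa using hne), hdup, hsub]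
      exact ih (i + 1) (PySem.Set.update dup c) (acc ++ [(pvSubB w i [] PySem.Set.empty c).1]) INV'

-- ===== VERDICT (by name: the statement is the Claim_ definition above) =====
theorem find_clique_cover_spec : Claim_equal_find_clique_cover := by
  intro cliques _
  unfold Spec_find_clique_cover find_clique_cover find_clique_cover_alt
  apply pvOuter_eq
  intro k n hk hmem
  rw [pvWinnerB_get?]
  simp only [PySem.Dict.contains_empty, Bool.false_eq_true, if_false, zero_add]
  have hchar := pvFirstIdx_char _ 0 k n hk hmem
  simp only [zero_add] at hchar
  rw [hchar]
  simp
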